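-- pv_equiv track=rewrite | github.com/royerlab/litemind | src/litemind/utils/uri_utils.py | is_valid_uri_path
-- ===== SOURCE A (Python) =====
-- def is_valid_uri_path(path_str: str) -> bool:
--     """
--     Validate a URI path component according to RFC 3986.
--
--     Parameters
--     ----------
--     path_str : str
--         The URI path string to validate
--
--     Returns
--     -------
--     bool
--         True if the path is valid, False otherwise
--     """
--     # Empty paths are allowed in some URIs
--     if path_str is None:
--         return True
--
--     # Check for backslashes which are not allowed in URI paths
--     if "\\" in path_str:
--         return False
--
--     # Check for proper percent-encoding
--     i = 0
--     while i < len(path_str):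
--         if path_str[i] == "%":
--             # Each percent encoding must be followed by two hex digits
--             if i + 2 >= len(path_str):
--                 return False
--             try:
--                 int(path_str[i + 1 : i + 3], 16)
--                 i += 3
--             except ValueError:
--                 return False
--         else:
--             i += 1
--
--     return True
-- ===== SOURCE B (Python) =====
-- def is_valid_uri_path(path_str: str) -> bool:
--     # Empty paths are allowed in some URIs
--     if path_str is None:
--         return True
--
--     # Backslashes are not allowed in URI paths
--     if "\\" in path_str:
--         return False
--
--     # Every '%' starts a segment in the split; each such segment must begin
--     # with two characters that int(..., 16) accepts as a hex number.
--     for segment in path_str.split("%")[1:]: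
--         if len(segment) < 2:
--             return False
--         try:
--             int(segment[:2], 16)
--         except ValueError:
--             return False
--
--     return True
-- ===== Notes on version B (the rewrite author's own statement) =====
-- stated objective: alternative
-- what changed: Replaces A's index-based while loop with manual 3-step pointer advancement by splitting the string on '%' once and validating the first two characters of each subsequent segment, keeping int(seg[:2], 16) so A's lenient hex acceptance (signs/whitespace) is preserved.
import Mathlib
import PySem

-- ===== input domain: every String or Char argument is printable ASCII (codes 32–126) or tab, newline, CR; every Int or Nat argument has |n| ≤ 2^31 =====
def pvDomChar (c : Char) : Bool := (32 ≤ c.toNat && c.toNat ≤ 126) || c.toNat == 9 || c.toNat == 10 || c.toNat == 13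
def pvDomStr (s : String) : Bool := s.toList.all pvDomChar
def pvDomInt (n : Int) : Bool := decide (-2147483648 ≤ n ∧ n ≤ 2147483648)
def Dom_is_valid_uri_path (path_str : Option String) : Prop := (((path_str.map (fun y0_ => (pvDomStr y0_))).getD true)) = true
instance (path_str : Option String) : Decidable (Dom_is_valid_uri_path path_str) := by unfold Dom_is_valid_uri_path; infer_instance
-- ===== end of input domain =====

-- B replaces A's index-based while loop (manual 3-step pointer advance) by one split on '%'
-- and a per-segment check of the first two characters; objective: alternative decomposition.

-- ===== PORT A =====
-- A's while loop over index i, transliterated as recursion on the remaining suffix of the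
-- string (cs = path_str[i:]): `path_str[i] == "%"` is the head test, `i + 2 >= len(path_str)`
-- is `rest.length < 2`, the slice `path_str[i+1:i+3]` is `rest.take 2`, `i += 3` / `i += 1`
-- are the recursive calls on `rest.drop 2` / `rest`; try int(..,16)/except = match some/none.
def pvLoopA : List Char → Bool
  | [] => true
  | c :: rest =>
    if c = '%' then
      if rest.length < 2 then false
      else
        match PySem.Int.ofCharsBase? (rest.take 2) 16 with
        | some _ => pvLoopA (rest.drop 2)
        | none => false
    else pvLoopA rest
termination_by cs => cs.length
decreasing_by all_goals simp

def is_valid_uri_path (path_str : Option String) : Bool :=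
  match path_str with
  | none => true
  | some s =>
    if PySem.Str.isIn "\\" s then false
    else pvLoopA s.toList

-- ===== PORT B =====
-- per-segment body of Source B's for loop: len(segment) < 2 → False; int(segment[:2], 16) ok?
def pvCheckSeg (seg : List Char) : Bool :=
  if seg.length < 2 then false
  else
    match PySem.Int.ofCharsBase? (PySem.Chars.slice seg none (some 2)) 16 with
    | some _ => true
    | none => false

def is_valid_uri_path_alt (path_str : Option String) : Bool :=
  match path_str with
  | none => true
  | some s =>
    if PySem.Str.isIn "\\" s then false
    else
      -- path_str.split("%")[1:], each segment checked (for-loop with early returns = all)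
      (PySem.List.slice (PySem.Chars.splitOn s.toList ['%']) (some 1) none).all pvCheckSeg

-- ===== PRECONDITION & SPEC =====
def Spec_is_valid_uri_path (path_str : Option String) (out : Bool) : Prop := out = is_valid_uri_path_alt path_str
instance (path_str : Option String) (out : Bool) : Decidable (Spec_is_valid_uri_path path_str out) := by unfold Spec_is_valid_uri_path; infer_instance

-- ===== CLAIM (what is proved, stated in full; the proofs are below) =====
def Claim_equal_is_valid_uri_path : Prop := ∀ (path_str : Option String), Dom_is_valid_uri_path path_str → Spec_is_valid_uri_path path_str (is_valid_uri_path path_str)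

-- ===== LEMMAS AND PROOFS =====

-- A simple structural model of str.split("%") used only inside the proofs.
def pvMySplit : List Char → List (List Char)
  | [] => [[]]
  | c :: rest => if c = '%' then [] :: pvMySplit rest else (pvMySplit rest).modifyHead (c :: ·)

lemma pvMySplit_ne_nil (cs : List Char) : pvMySplit cs ≠ [] := by
  cases cs with
  | nil => simp [pvMySplit]
  | cons c rest =>
    by_cases hc : c = '%'
    · simp [pvMySplit, hc]
    · simp only [pvMySplit, if_neg hc]
      cases h : pvMySplit rest with
      | nil => exact absurd h (pvMySplit_ne_nil rest)
      | cons a t => simp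

lemma pvSplitOn_go_eq (fuel : Nat) : ∀ (l cur : List Char) (acc : List (List Char)),
    l.length < fuel →
    PySem.Chars.splitOn.go ['%'] fuel l cur acc = acc.reverse ++ (pvMySplit l).modifyHead (cur.reverse ++ ·) := by
  induction fuel with
  | zero => intro l cur acc h; exact absurd h (Nat.not_lt_zero _)
  | succ fuel ih =>
    intro l cur acc h
    cases l with
    | nil => simp [PySem.Chars.splitOn.go, pvMySplit]
    | cons c rest =>
      by_cases hc : c = '%'
      · subst hc
        have hpre : List.isPrefixOf ['%'] ('%' :: rest) = true := by
          simp [List.isPrefixOf]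
        simp only [PySem.Chars.splitOn.go, hpre, if_true]
        rw [ih _ _ _ (by simp at h ⊢; omega)]
        rcases hsp : pvMySplit rest with _ | ⟨hd, tl⟩
        · exact absurd hsp (pvMySplit_ne_nil rest)
        · simp [pvMySplit, hsp]
      · have hpre : List.isPrefixOf ['%'] (c :: rest) = false := by
          simp [List.isPrefixOf]
          exact fun hh => hc hh.symm
        simp only [PySem.Chars.splitOn.go, hpre, Bool.false_eq_true, if_false]
        rw [ih _ _ _ (by simp at h ⊢; omega)]
        rcases hsp : pvMySplit rest with _ | ⟨hd, tl⟩
        · exact absurd hsp (pvMySplit_ne_nil rest)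
        · simp [pvMySplit, hc, hsp]

lemma pvSplitOn_eq (l : List Char) : PySem.Chars.splitOn l ['%'] = pvMySplit l := by
  have h := pvSplitOn_go_eq (l.length + 1) l [] [] (by omega)
  rcases hsp : pvMySplit l with _ | ⟨hd, tl⟩
  · exact absurd hsp (pvMySplit_ne_nil l)
  · rw [PySem.Chars.splitOn, h, hsp]; simp

-- the printable-ASCII + tab/newline/CR alphabet of the input domain, as a literal list
def pvChars : List Char := '\t' :: '\n' :: '\r' :: (List.range 95).map (fun k => Char.ofNat (32 + k))

lemma pvMemChars (c : Char) (h : pvDomChar c = true) : c ∈ pvChars := by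
  have hofn : Char.ofNat c.toNat = c := Char.ofNat_toNat c
  simp only [pvDomChar, Bool.or_eq_true, Bool.and_eq_true, decide_eq_true_eq, beq_iff_eq] at h
  simp only [pvChars, List.mem_cons, List.mem_map, List.mem_range]
  rcases h with ((⟨h1, h2⟩ | h9) | h10) | h13
  · right; right; right
    refine ⟨c.toNat - 32, by omega, ?_⟩
    rw [show 32 + (c.toNat - 32) = c.toNat by omega, hofn]
  · left; rw [← hofn, h9]
  · right; left; rw [← hofn, h10]
  · right; right; left; rw [← hofn, h13]

-- int(s, 16) never accepts a two-character string containing '%'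
set_option maxRecDepth 8000 in
lemma pvPctNone (c : Char) (h : pvDomChar c = true) :
    PySem.Int.ofCharsBase? ['%', c] 16 = none ∧ PySem.Int.ofCharsBase? [c, '%'] 16 = none := by
  have hmem := pvMemChars c h
  have hall : pvChars.all (fun x =>
      (PySem.Int.ofCharsBase? ['%', x] 16 == none) &&
      (PySem.Int.ofCharsBase? [x, '%'] 16 == none)) = true := by decide
  have hx := List.all_eq_true.mp hall c hmem
  simp only [Bool.and_eq_true, beq_iff_eq] at hx
  exact hx

lemma pvDropOneModifyHead {α : Type} (l : List α) (f : α → α) :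
    (l.modifyHead f).drop 1 = l.drop 1 := by cases l <;> simp

lemma pvCheckSeg_cons2 (a b : Char) (t : List Char) :
    pvCheckSeg (a :: b :: t) = (PySem.Int.ofCharsBase? [a, b] 16).isSome := by
  unfold pvCheckSeg
  have hs : PySem.List.slice (a :: b :: t) none (some 2) = [a, b] := by
    norm_num [pysem]
    rfl
  rw [PySem.Chars.slice_eq_listSlice, hs]
  have hlen : ¬ (a :: b :: t).length < 2 := by simp
  rw [if_neg hlen]
  rcases hx : PySem.Int.ofCharsBase? [a, b] 16 with _ | v <;> simp

lemma pvMain (n : Nat) : ∀ cs : List Char, cs.length ≤ n → (∀ c ∈ cs, pvDomChar c = true) →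
    pvLoopA cs = ((pvMySplit cs).drop 1).all pvCheckSeg := by
  induction n with
  | zero =>
    intro cs hlen _
    cases cs with
    | nil => simp [pvLoopA, pvMySplit]
    | cons a t => simp at hlen
  | succ n ih =>
    intro cs hlen hdom
    cases cs with
    | nil => simp [pvLoopA, pvMySplit]
    | cons c rest =>
      by_cases hc : c = '%'
      · subst hc
        rw [show pvMySplit ('%' :: rest) = [] :: pvMySplit rest from by simp [pvMySplit]]
        rw [show (([] : List Char) :: pvMySplit rest).drop 1 = pvMySplit rest from rfl]
        cases rest with
        | nil => simp [pvLoopA, pvMySplit, pvCheckSeg]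
        | cons r0 rest1 =>
          have hd0 : pvDomChar r0 = true := hdom r0 (by simp)
          by_cases h0 : r0 = '%'
          · subst h0
            cases rest1 with
            | nil => simp [pvLoopA, pvMySplit, pvCheckSeg]
            | cons r1 rest2 =>
              have hd1 : pvDomChar r1 = true := hdom r1 (by simp)
              have hnone := (pvPctNone r1 hd1).1
              simp [pvLoopA, pvMySplit, pvCheckSeg, hnone]
          · cases rest1 with
            | nil => simp [pvLoopA, pvMySplit, pvCheckSeg, h0]
            | cons r1 rest2 =>
              have hd1 : pvDomChar r1 = true := hdom r1 (by simp)
              by_cases h1 : r1 = '%'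
              · subst h1
                have hnone := (pvPctNone r0 hd0).2
                simp [pvLoopA, pvMySplit, pvCheckSeg, hnone, h0]
              · rcases hsp : pvMySplit rest2 with _ | ⟨hd, tl⟩
                · exact absurd hsp (pvMySplit_ne_nil rest2)
                · have ihr := ih rest2 (by simp at hlen ⊢; omega)
                    (fun x hx => hdom x (by simp [hx]))
                  rcases h16 : PySem.Int.ofCharsBase? [r0, r1] 16 with _ | v
                  · simp [pvLoopA, pvMySplit, pvCheckSeg_cons2, h16, h0, h1, hsp]
                  · simp [pvLoopA, pvMySplit, pvCheckSeg_cons2, h16, h0, h1, hsp]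
                    rw [ihr, hsp]
                    simp
      · have ihr := ih rest (by simp at hlen ⊢; omega) (fun x hx => hdom x (by simp [hx]))
        rw [show pvMySplit (c :: rest) = (pvMySplit rest).modifyHead (c :: ·) from by
              simp [pvMySplit, hc]]
        rw [pvDropOneModifyHead]
        rw [show pvLoopA (c :: rest) = pvLoopA rest from by simp [pvLoopA, hc]]
        exact ihr

-- ===== VERDICT (by name: the statement is the Claim_ definition above) =====
theorem is_valid_uri_path_spec : Claim_equal_is_valid_uri_path := by
  intro p hdom
  unfold Spec_is_valid_uri_path
  cases p with
  | none => rfl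
  | some s =>
    have hdom' : ∀ c ∈ s.toList, pvDomChar c = true := by
      simpa [Dom_is_valid_uri_path, pvDomStr, List.all_eq_true] using hdom
    simp only [is_valid_uri_path, is_valid_uri_path_alt]
    by_cases hb : PySem.Str.isIn "\\" s = true
    · rw [if_pos hb, if_pos hb]
    · rw [if_neg hb, if_neg hb, PySem.List.slice_from_one, ← List.drop_one, pvSplitOn_eq]
      exact pvMain s.toList.length s.toList le_rfl hdom'
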